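-- pv_equiv track=rewrite | github.com/johanneshagspiel/gcode-viewer | src/gcode_viewer/gcode/layer_parser.py | split_into_layers
-- ===== SOURCE A (Python) =====
-- def split_into_layers(list_to_split):
--
--     result_list = []
--     current_layer = []
--
--     for line in list_to_split:
--         if ";TIME_ELAPSED:" in line:
--             current_layer.append(line)
--             result_list.append(current_layer)
--             current_layer = []
--         else:
--             current_layer.append(line)
--
--     return result_list
-- ===== SOURCE B (Python) =====
-- def split_into_layers(list_to_split):
--     marker_indices = [i for i, line in enumerate(list_to_split)
--                       if ";TIME_ELAPSED:" in line]
--     result = []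
--     start = 0
--     for idx in marker_indices:
--         result.append(list_to_split[start:idx + 1])
--         start = idx + 1
--     return result
-- ===== Notes on version B (the rewrite author's own statement) =====
-- stated objective: alternative
-- what changed: Replaces A's single fold carrying a growing current-layer accumulator with a two-pass index-and-slice decomposition: first collect the positions of all TIME_ELAPSED marker lines via enumerate, then cut the input into slices between a running start cursor and each marker (naturally emitting no trailing segment after the last marker).
import Mathlib
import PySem

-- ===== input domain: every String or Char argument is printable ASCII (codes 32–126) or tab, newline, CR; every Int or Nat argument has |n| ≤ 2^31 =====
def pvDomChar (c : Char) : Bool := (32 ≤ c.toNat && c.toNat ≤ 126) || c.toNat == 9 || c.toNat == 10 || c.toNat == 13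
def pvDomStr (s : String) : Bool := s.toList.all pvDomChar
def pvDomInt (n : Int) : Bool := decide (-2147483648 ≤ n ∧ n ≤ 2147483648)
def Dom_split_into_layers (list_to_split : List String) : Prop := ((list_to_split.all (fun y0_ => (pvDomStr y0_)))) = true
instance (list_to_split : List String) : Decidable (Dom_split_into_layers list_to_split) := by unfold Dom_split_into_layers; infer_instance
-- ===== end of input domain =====

-- B replaces A's one fold with a growing current-layer accumulator by a two-pass
-- collect-marker-indices-then-slice decomposition (objective: alternative, same cost).

-- ===== PORT A =====
def split_into_layers (list_to_split : List String) : List (List String) :=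
  (list_to_split.foldl
    (fun (st : List (List String) × List String) line =>
      if PySem.Str.isIn ";TIME_ELAPSED:" line then
        (st.1 ++ [st.2 ++ [line]], ([] : List String))
      else
        (st.1, st.2 ++ [line]))
    (([] : List (List String)), ([] : List String))).1

-- ===== PORT B =====
def split_into_layers_alt (list_to_split : List String) : List (List String) :=
  let marker_indices : List Int :=
    ((PySem.List.enumerate list_to_split 0).filter
      (fun p => PySem.Str.isIn ";TIME_ELAPSED:" p.2)).map (·.1)
  (marker_indices.foldl
    (fun (st : List (List String) × Int) idx =>
      (st.1 ++ [PySem.List.slice list_to_split (some st.2) (some (idx + 1))], idx + 1))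
    (([] : List (List String)), (0 : Int))).1

-- ===== PRECONDITION & SPEC =====
def Spec_split_into_layers (list_to_split : List String) (out : List (List String)) : Prop := out = split_into_layers_alt list_to_split
instance (list_to_split : List String) (out : List (List String)) : Decidable (Spec_split_into_layers list_to_split out) := by unfold Spec_split_into_layers; infer_instance

-- ===== CLAIM (what is proved, stated in full; the proofs are below) =====
def Claim_equal_split_into_layers : Prop := ∀ (list_to_split : List String), Dom_split_into_layers list_to_split → Spec_split_into_layers list_to_split (split_into_layers list_to_split)

-- ===== LEMMAS AND PROOFS =====

-- A's loop, as structural recursion on the remaining lines with the current layer as parameter.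
def layersA (cur : List String) : List String → List (List String)
  | [] => []
  | l :: ls =>
    if PySem.Str.isIn ";TIME_ELAPSED:" l then (cur ++ [l]) :: layersA [] ls
    else layersA (cur ++ [l]) ls

-- marker indices as Nats, structurally
def marksN : List String → List Nat
  | [] => []
  | l :: ls =>
    if PySem.Str.isIn ";TIME_ELAPSED:" l then 0 :: (marksN ls).map (· + 1)
    else (marksN ls).map (· + 1)

-- B's loop in recursive form over Nat indices, slices as drop/take
def snat (lst : List String) (start : Nat) : List Nat → List (List String)
  | [] => []
  | i :: is => (lst.drop start).take (i + 1 - start) :: snat lst (i + 1) is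

def prependFirst (cur : List String) : List (List String) → List (List String)
  | [] => []
  | x :: xs => (cur ++ x) :: xs

theorem prependFirst_nil (xs : List (List String)) : prependFirst [] xs = xs := by
  cases xs <;> simp [prependFirst]

theorem foldA_eq (ls : List String) : ∀ (res : List (List String)) (cur : List String),
    (ls.foldl
      (fun (st : List (List String) × List String) line =>
        if PySem.Str.isIn ";TIME_ELAPSED:" line then
          (st.1 ++ [st.2 ++ [line]], ([] : List String))
        else (st.1, st.2 ++ [line])) (res, cur)).1
      = res ++ layersA cur ls := by
  induction ls with
  | nil => intro res cur; simp [layersA]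
  | cons l ls ih =>
    intro res cur
    simp only [List.foldl_cons]
    split_ifs with h
    · rw [ih]; simp only [layersA]; rw [if_pos h]; simp
    · rw [ih]; simp only [layersA]; rw [if_neg h]

theorem foldB_eq (lst : List String) (is : List Nat) :
    ∀ (res : List (List String)) (st : Nat),
    ((is.map (Nat.cast : Nat → Int)).foldl
      (fun (st : List (List String) × Int) idx =>
        (st.1 ++ [PySem.List.slice lst (some st.2) (some (idx + 1))], idx + 1))
      (res, (Nat.cast st : Int))).1
      = res ++ snat lst st is := by
  induction is with
  | nil => intro res st; simp [snat]
  | cons i is ih =>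
    intro res st
    simp only [List.map_cons, List.foldl_cons]
    have hc : (Nat.cast i : Int) + 1 = (Nat.cast (i + 1) : Int) := by push_cast; ring
    rw [hc, PySem.List.slice_natCast, ih (res ++ [(lst.drop st).take (i + 1 - st)]) (i + 1)]
    simp [snat]

theorem marks_eq (ls : List String) : ∀ (s : Int),
    (((PySem.List.enumerate ls s).filter
      (fun p => PySem.Str.isIn ";TIME_ELAPSED:" p.2)).map (·.1))
      = (marksN ls).map (fun n => s + (Nat.cast n : Int)) := by
  induction ls with
  | nil => intro s; simp [PySem.List.enumerate_nil, marksN]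
  | cons l ls ih =>
    intro s
    rw [PySem.List.enumerate_cons]
    by_cases h : PySem.Str.isIn ";TIME_ELAPSED:" l
    · simp only [List.filter_cons, h, if_pos, List.map_cons, marksN]
      rw [ih (s + 1), List.map_map]
      congr 1
      · simp
      · apply List.map_congr_left; intro n _; simp; ring
    · simp only [List.filter_cons, h, Bool.false_eq_true, if_false, marksN]
      rw [ih (s + 1), List.map_map]
      apply List.map_congr_left; intro n _; simp; ring

theorem snat_shift (lst : List String) (l : String) (is : List Nat) :
    ∀ st, snat (l :: lst) (st + 1) (is.map (· + 1)) = snat lst st is := by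
  induction is with
  | nil => intro st; simp [snat]
  | cons i is ih =>
    intro st
    simp only [List.map_cons, snat, List.drop_succ_cons]
    have e : i + 1 + 1 - (st + 1) = i + 1 - st := by omega
    rw [e, ih (i + 1)]

theorem main_eq (ls : List String) : ∀ cur,
    layersA cur ls = prependFirst cur (snat ls 0 (marksN ls)) := by
  induction ls with
  | nil => intro cur; simp [layersA, marksN, snat, prependFirst]
  | cons l ls ih =>
    intro cur
    by_cases h : PySem.Str.isIn ";TIME_ELAPSED:" l
    · simp only [layersA, h, if_pos, marksN, snat]
      have h1 : snat (l :: ls) (0 + 1) ((marksN ls).map (· + 1)) = snat ls 0 (marksN ls) :=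
        snat_shift ls l (marksN ls) 0
      simp only [Nat.zero_add] at h1
      rw [h1, ih [], prependFirst_nil]
      simp [prependFirst]
    · simp only [layersA, h, if_neg, Bool.false_eq_true, not_false_iff, marksN]
      rw [ih (cur ++ [l])]
      cases hm : marksN ls with
      | nil => simp [snat, prependFirst]
      | cons i is =>
        simp only [List.map_cons, snat, List.drop_zero, prependFirst]
        have h1 : snat (l :: ls) (i + 1 + 1) (is.map (· + 1)) = snat ls (i + 1) is :=
          snat_shift ls l is (i + 1)
        rw [h1]
        have e : i + 1 + 1 - 0 = (i + 1 - 0) + 1 := by omega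
        rw [e, List.take_succ_cons]
        simp

-- ===== VERDICT (by name: the statement is the Claim_ definition above) =====
theorem split_into_layers_spec : Claim_equal_split_into_layers := by
  intro lst _
  unfold Spec_split_into_layers split_into_layers split_into_layers_alt
  rw [foldA_eq lst [] []]
  simp only []
  rw [marks_eq lst 0]
  have h0 : (marksN lst).map (fun n => (0 : Int) + (Nat.cast n : Int))
      = (marksN lst).map (Nat.cast : Nat → Int) := by
    apply List.map_congr_left; intro n _; ring
  rw [h0]
  have hB := foldB_eq lst (marksN lst) [] 0
  simp only [Nat.cast_zero] at hB
  rw [hB, main_eq lst [], prependFirst_nil]
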